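-- pv_equiv track=rewrite | github.com/Cioscos/Pixellator | main.py | generate_calibration_frame
-- ===== SOURCE A (Python) =====
-- def generate_calibration_frame(width, height):
--     """
--     Genera un frame ASCII di calibrazione tutto bianco, con un bordo e una croce centrale.
--
--     Parametri:
--         width (int): Larghezza dell'output ASCII.
--         height (int): Altezza dell'output ASCII.
--
--     Ritorna:
--         str: Stringa ASCII con il frame bianco, bordi e croce centrale.
--     """
--     # Caratteri
--     BORDER_CHAR = "#"
--     CROSS_CHAR = "+"
--     WHITE_CHAR = "█"  # Blocchi pieni per simulare un frame bianco
--
--     # Crea una matrice di caratteri bianchi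
--     ascii_frame = [[WHITE_CHAR] * width for _ in range(height)]
--
--     # Disegna i bordi del rettangolo
--     for x in range(width):
--         ascii_frame[0][x] = BORDER_CHAR  # Riga superiore
--         ascii_frame[-1][x] = BORDER_CHAR  # Riga inferiore
--
--     for y in range(height):
--         ascii_frame[y][0] = BORDER_CHAR  # Colonna sinistra
--         ascii_frame[y][-1] = BORDER_CHAR  # Colonna destra
--
--     # Disegna la croce centrale
--     center_y, center_x = height // 2, width // 2
--     for x in range(width):
--         ascii_frame[center_y][x] = CROSS_CHAR  # Linea orizzontale
--     for y in range(height):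
--         ascii_frame[y][center_x] = CROSS_CHAR  # Linea verticale
--
--     # Converti la matrice in una stringa
--     ascii_string = "\n".join("".join(row) for row in ascii_frame)
--     return ascii_string
-- ===== SOURCE B (Python) =====
-- def generate_calibration_frame(width, height):
--     """Row-driven rebuild: each row is made directly from its kind (center / border /
--     interior) with bulk string operations; no char matrix and no overwriting passes."""
--     center_y, center_x = height // 2, width // 2
--
--     def row(y):
--         if y == center_y:
--             return "+" * width
--         if y == 0 or y == height - 1:
--             chars = "#" * width
--         elif width >= 2:
--             chars = "#" + "\u2588" * (width - 2) + "#"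
--         else:
--             chars = "#" * width
--         return chars[:center_x] + "+" + chars[center_x + 1:]
--
--     return "\n".join(row(y) for y in range(height))
-- ===== Notes on version B (the rewrite author's own statement) =====
-- stated objective: faster
-- what changed: Replaces A's paint-then-overwrite char matrix (build all-white matrix, overwrite border cells, overwrite cross cells, join) by a single row-driven pass that builds each row directly from its kind (center row / border row / interior row) with bulk string repetition and one splice for the cross column.
import Mathlib
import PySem

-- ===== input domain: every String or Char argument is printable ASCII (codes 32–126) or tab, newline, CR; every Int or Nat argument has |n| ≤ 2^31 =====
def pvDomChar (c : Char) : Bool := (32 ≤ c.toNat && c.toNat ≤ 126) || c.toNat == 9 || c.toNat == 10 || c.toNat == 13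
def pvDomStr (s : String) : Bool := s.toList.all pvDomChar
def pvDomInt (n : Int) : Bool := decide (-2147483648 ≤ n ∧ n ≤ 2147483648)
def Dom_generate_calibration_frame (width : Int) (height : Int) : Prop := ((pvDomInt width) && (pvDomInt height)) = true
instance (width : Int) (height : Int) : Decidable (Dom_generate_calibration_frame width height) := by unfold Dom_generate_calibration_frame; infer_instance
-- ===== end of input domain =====

-- B replaces A's paint-then-overwrite matrix passes by one row-driven pass built from bulk string ops (objective: faster, constant factor).

-- ===== PORT A =====
-- ascii_frame[y][x] = c  (possibly negative index; exact within Pre_, where every index is in range)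
def pvSetCell (m : List (List Char)) (y : Int) (x : Int) (c : Char) : List (List Char) :=
  PySem.List.pySetD m y (PySem.List.pySetD (PySem.List.pyGetD m y []) x c)

def generate_calibration_frame (width : Int) (height : Int) : String :=
  let frame0 : List (List Char) := List.replicate height.toNat (List.replicate width.toNat '█')
  let f1 := (PySem.List.pyRange 0 width 1).foldl
    (fun f x => pvSetCell (pvSetCell f 0 x '#') (-1) x '#') frame0
  let f2 := (PySem.List.pyRange 0 height 1).foldl
    (fun f y => pvSetCell (pvSetCell f y 0 '#') y (-1) '#') f1
  let center_y := PySem.Int.floordiv height 2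
  let center_x := PySem.Int.floordiv width 2
  let f3 := (PySem.List.pyRange 0 width 1).foldl (fun f x => pvSetCell f center_y x '+') f2
  let f4 := (PySem.List.pyRange 0 height 1).foldl (fun f y => pvSetCell f y center_x '+') f3
  String.ofList (PySem.Chars.join ['\n'] f4)

-- ===== PORT B =====
def generate_calibration_frame_alt (width : Int) (height : Int) : String :=
  let center_y := PySem.Int.floordiv height 2
  let center_x := PySem.Int.floordiv width 2
  let row : Int → List Char := fun y =>
    if y == center_y then PySem.List.pyRepeat ['+'] width
    else
      let chars : List Char :=
        if y == 0 || y == height - 1 then List.replicate width.toNat '#'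
        else if 2 ≤ width then '#' :: (List.replicate (width - 2).toNat '\u2588' ++ ['#'])
        else List.replicate width.toNat '#'
      PySem.List.slice chars none (some center_x) ++ ['+']
        ++ PySem.List.slice chars (some (center_x + 1)) none
  String.ofList (PySem.Chars.join ['\n'] ((PySem.List.pyRange 0 height 1).map row))

-- ===== PRECONDITION & SPEC =====
-- Pre_ excludes exactly the inputs where A raises IndexError: one dimension ≤ 0 while the other is ≥ 1
-- (the border loop then indexes an empty row/frame).
def Pre_generate_calibration_frame (width : Int) (height : Int) : Prop :=
  (1 ≤ width ∧ 1 ≤ height) ∨ (width ≤ 0 ∧ height ≤ 0)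
instance (width : Int) (height : Int) : Decidable (Pre_generate_calibration_frame width height) := by
  unfold Pre_generate_calibration_frame; infer_instance

def pvWitness_generate_calibration_frame : Int × Int := (5, 4)

def Spec_generate_calibration_frame (width : Int) (height : Int) (out : String) : Prop :=
  out = generate_calibration_frame_alt width height
instance (width : Int) (height : Int) (out : String) : Decidable (Spec_generate_calibration_frame width height out) := by
  unfold Spec_generate_calibration_frame; infer_instance

-- ===== CLAIM (what is proved, stated in full; the proofs are below) =====
def Claim_equal_generate_calibration_frame : Prop := ∀ (width : Int) (height : Int), Dom_generate_calibration_frame width height → Pre_generate_calibration_frame width height → Spec_generate_calibration_frame width height (generate_calibration_frame width height)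

-- ===== LEMMAS AND PROOFS =====

-- read cell (j,i) of a matrix
def pvGet2 (m : List (List Char)) (j i : Nat) : Option Char := m[j]?.bind (fun r => r[i]?)

-- invariant: H rows, each of length W
def pvInv (m : List (List Char)) (H W : Nat) : Prop := m.length = H ∧ ∀ r ∈ m, r.length = W

theorem pvSetD_neg_one {α : Type} (r : List α) (h : r ≠ []) (v : α) :
    PySem.List.pySetD r (-1) v = r.set (r.length - 1) v := by
  have hl : 1 ≤ r.length := by cases r <;> simp_all
  simp [PySem.List.pySetD, PySem.List.pySet?, PySem.List.pyIdx?, hl]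

theorem pvGetD_neg_one_getD (m : List (List Char)) (h : m ≠ []) :
    PySem.List.pyGetD m (-1) [] = m.getD (m.length - 1) [] := by
  have hl : m.length - 1 < m.length := by cases m <;> simp_all
  rw [PySem.List.pyGetD_neg_one _ _ h, List.getLast_eq_getElem,
    List.getD_eq_getElem?_getD, List.getElem?_eq_getElem hl]
  rfl

-- normalization of the two negative indices A uses
theorem pvSetCell_neg_row (m : List (List Char)) (h : m ≠ []) (x : Int) (c : Char) :
    pvSetCell m (-1) x c = pvSetCell m ((m.length - 1 : Nat) : Int) x c := by
  unfold pvSetCell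
  rw [pvSetD_neg_one m h, pvGetD_neg_one_getD m h,
    PySem.List.pySetD_natCast, PySem.List.pyGetD_natCast]

theorem pvSetCell_neg_col (m : List (List Char)) (y : Int) (c : Char) :
    pvSetCell m y (-1) c
      = pvSetCell m y (((PySem.List.pyGetD m y []).length - 1 : Nat) : Int) c := by
  unfold pvSetCell
  by_cases h : PySem.List.pyGetD m y [] = []
  · rw [h]; simp [PySem.List.pySetD, PySem.List.pySet?, PySem.List.pyIdx?]
  · rw [pvSetD_neg_one _ h, PySem.List.pySetD_natCast]

theorem pvSetCell_natCast (m : List (List Char)) (y x : Nat) (c : Char) :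
    pvSetCell m (y : Int) (x : Int) c = m.set y ((m.getD y []).set x c) := by
  unfold pvSetCell
  rw [PySem.List.pySetD_natCast, PySem.List.pyGetD_natCast, PySem.List.pySetD_natCast]

-- cell-level characterization of one in-range assignment
theorem pvGet2_setCell (m : List (List Char)) (H W : Nat) (hInv : pvInv m H W)
    (y x : Nat) (hy : y < H) (hx : x < W) (c : Char) (j i : Nat) :
    pvGet2 (pvSetCell m (y : Int) (x : Int) c) j i
      = if j = y ∧ i = x then some c else pvGet2 m j i := by
  obtain ⟨hlen, hrows⟩ := hInv
  have hyl : y < m.length := by omega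
  have hrow : m.getD y [] = m[y] := by
    rw [List.getD_eq_getElem?_getD, List.getElem?_eq_getElem hyl]; rfl
  have hW : (m[y]'hyl).length = W := hrows _ (List.getElem_mem hyl)
  rw [pvSetCell_natCast]
  unfold pvGet2
  rw [List.getElem?_set]
  by_cases hj : y = j
  · subst hj
    simp only [hyl, if_true, Option.bind_some, hrow, List.getElem?_set, hW]
    by_cases hi : x = i
    · subst hi; simp [hx]
    · simp [hi, Ne.symm hi, List.getElem?_eq_getElem hyl]
  · have : ¬ (j = y ∧ i = x) := fun hc => hj hc.1.symm
    simp [hj, this]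

theorem pvInv_setCell (m : List (List Char)) (H W : Nat) (hInv : pvInv m H W)
    (y x : Nat) (hy : y < H) (c : Char) : pvInv (pvSetCell m (y : Int) (x : Int) c) H W := by
  obtain ⟨hlen, hrows⟩ := hInv
  have hyl : y < m.length := by omega
  rw [pvSetCell_natCast]
  refine ⟨by simpa using hlen, ?_⟩
  intro r hr
  rcases List.mem_or_eq_of_mem_set hr with h | h
  · exact hrows _ h
  · subst h
    rw [List.length_set]
    have : m.getD y [] = m[y] := by
      rw [List.getD_eq_getElem?_getD, List.getElem?_eq_getElem hyl]; rfl
    rw [this]; exact hrows _ (List.getElem_mem hyl)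

-- generic paint loop: every iteration writes the same character c into the cells described by Q
theorem pvFold_paint (c : Char) (Inv : List (List Char) → Prop) (Q : Int → Nat → Nat → Prop)
    [∀ x j i, Decidable (Q x j i)]
    (L : List Int) (step : List (List Char) → Int → List (List Char))
    (hstep : ∀ f x, x ∈ L → Inv f → Inv (step f x) ∧
        ∀ j i, pvGet2 (step f x) j i = if Q x j i then some c else pvGet2 f j i) :
    ∀ m, Inv m → Inv (L.foldl step m) ∧
      ∀ j i, pvGet2 (L.foldl step m) j i
        = if ∃ x ∈ L, Q x j i then some c else pvGet2 m j i := by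
  induction L with
  | nil => intro m hm; exact ⟨hm, by simp⟩
  | cons a L ih =>
    intro m hm
    obtain ⟨h1, h2⟩ := hstep m a (List.mem_cons_self) hm
    obtain ⟨h3, h4⟩ := ih (fun f x hx hf => hstep f x (List.mem_cons_of_mem _ hx) hf) (step m a) h1
    refine ⟨by simpa using h3, ?_⟩
    intro j i
    rw [List.foldl_cons, h4 j i, h2 j i]
    by_cases hQa : Q a j i <;> by_cases hEx : ∃ x ∈ L, Q x j i <;>
      simp [List.mem_cons, hQa, hEx]

-- ===== VERDICT (by name: the statement is the Claim_ definition above) =====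
-- A's matrix pipeline with the sizes and the two center indices already in Nat form
def pvA (W H : Nat) : List (List Char) :=
  let m0 := List.replicate H (List.replicate W '\u2588')
  let f1 := (PySem.List.pyRange 0 (W:Int) 1).foldl
    (fun f x => pvSetCell (pvSetCell f 0 x '#') (-1) x '#') m0
  let f2 := (PySem.List.pyRange 0 (H:Int) 1).foldl
    (fun f y => pvSetCell (pvSetCell f y 0 '#') y (-1) '#') f1
  let f3 := (PySem.List.pyRange 0 (W:Int) 1).foldl
    (fun f x => pvSetCell f ((H/2 : Nat) : Int) x '+') f2
  (PySem.List.pyRange 0 (H:Int) 1).foldl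
    (fun f y => pvSetCell f y ((W/2 : Nat) : Int) '+') f3

theorem pv_floordiv_two (H : Nat) : PySem.Int.floordiv (H : Int) 2 = ((H / 2 : Nat) : Int) := by
  rw [PySem.Int.floordiv_eq_ediv_of_pos (by norm_num)]
  omega

theorem pvA_eq (W H : Nat) :
    generate_calibration_frame (W : Int) (H : Int)
      = String.ofList (PySem.Chars.join ['\n'] (pvA W H)) := by
  unfold generate_calibration_frame pvA
  simp only [Int.toNat_natCast, pv_floordiv_two]

theorem pvRowLen (m : List (List Char)) (H W : Nat) (hInv : pvInv m H W) (y : Nat) (hy : y < H) :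
    (PySem.List.pyGetD m (y : Int) []).length = W := by
  have hyl : y < m.length := by have := hInv.1; omega
  rw [PySem.List.pyGetD_natCast, List.getD_eq_getElem?_getD, List.getElem?_eq_getElem hyl]
  exact hInv.2 _ (List.getElem_mem hyl)

set_option maxHeartbeats 2000000 in
theorem pvA_props (W H : Nat) (hW : 1 ≤ W) (hH : 1 ≤ H) :
    pvInv (pvA W H) H W ∧ ∀ j i, j < H → i < W →
      pvGet2 (pvA W H) j i = some (
        if i = W/2 then '+'
        else if j = H/2 then '+'
        else if i = 0 ∨ i = W - 1 then '#'
        else if j = 0 ∨ j = H - 1 then '#'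
        else '\u2588') := by
  unfold pvA
  have hInv0 : pvInv (List.replicate H (List.replicate W '\u2588')) H W :=
    ⟨by simp, by intro r hr; simp [List.eq_of_mem_replicate hr]⟩
  have hget0 : ∀ j i, pvGet2 (List.replicate H (List.replicate W '\u2588')) j i
      = if j < H ∧ i < W then some '\u2588' else none := by
    intro j i
    unfold pvGet2
    by_cases hj : j < H <;> by_cases hi : i < W <;>
      simp [hj, hi]
  -- loop 1: top and bottom border rows
  have L1 := pvFold_paint '#' (pvInv · H W)
    (fun x j i => (j = 0 ∨ j = H - 1) ∧ x = (i : Int))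
    (PySem.List.pyRange 0 (W:Int) 1)
    (fun f x => pvSetCell (pvSetCell f 0 x '#') (-1) x '#')
    (by
      intro f x hx hf
      simp only []
      beta_reduce
      obtain ⟨hx0, hxW⟩ := (PySem.List.mem_pyRange_one).1 hx
      obtain ⟨xt, rfl⟩ : ∃ t : Nat, x = (t : Int) := ⟨x.toNat, (Int.toNat_of_nonneg hx0).symm⟩
      have hxt : xt < W := by exact_mod_cast hxW
      have hI1 : pvInv (pvSetCell f ((0:Nat) : Int) (xt : Int) '#') H W :=
        pvInv_setCell f H W hf 0 xt (by omega) '#'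
      have hg1 := pvGet2_setCell f H W hf 0 xt (by omega) hxt '#'
      have hne : pvSetCell f ((0:Nat) : Int) (xt : Int) '#' ≠ [] := by
        have := hI1.1
        intro hc; rw [hc] at this; simp at this; omega
      have hcast0 : ((0:Nat) : Int) = (0 : Int) := rfl
      rw [hcast0] at hI1 hg1 hne
      rw [pvSetCell_neg_row _ hne, hI1.1]
      constructor
      · exact pvInv_setCell _ H W hI1 (H-1) xt (by omega) '#'
      · intro j i
        rw [pvGet2_setCell _ H W hI1 (H-1) xt (by omega) hxt '#', hg1 j i]
        simp only [Nat.cast_inj]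
        split_ifs <;> first | rfl | omega)
  -- loop 2: left and right border columns
  have L2 := pvFold_paint '#' (pvInv · H W)
    (fun y j i => y = (j : Int) ∧ (i = 0 ∨ i = W - 1))
    (PySem.List.pyRange 0 (H:Int) 1)
    (fun f y => pvSetCell (pvSetCell f y 0 '#') y (-1) '#')
    (by
      intro f y hy hf
      simp only []
      beta_reduce
      obtain ⟨hy0, hyH⟩ := (PySem.List.mem_pyRange_one).1 hy
      obtain ⟨yt, rfl⟩ : ∃ t : Nat, y = (t : Int) := ⟨y.toNat, (Int.toNat_of_nonneg hy0).symm⟩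
      have hyt : yt < H := by exact_mod_cast hyH
      have hI1 : pvInv (pvSetCell f (yt : Int) ((0:Nat) : Int) '#') H W :=
        pvInv_setCell f H W hf yt 0 hyt '#'
      have hg1 := pvGet2_setCell f H W hf yt 0 hyt (by omega) '#'
      have hcast0 : ((0:Nat) : Int) = (0 : Int) := rfl
      rw [hcast0] at hI1 hg1
      rw [pvSetCell_neg_col _ (yt : Int) '#', pvRowLen _ H W hI1 yt hyt]
      constructor
      · exact pvInv_setCell _ H W hI1 yt (W-1) hyt '#'
      · intro j i
        rw [pvGet2_setCell _ H W hI1 yt (W-1) hyt (by omega) '#', hg1 j i]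
        simp only [Nat.cast_inj]
        split_ifs <;> first | rfl | omega)
  -- loop 3: horizontal center line
  have L3 := pvFold_paint '+' (pvInv · H W)
    (fun x j i => j = H/2 ∧ x = (i : Int))
    (PySem.List.pyRange 0 (W:Int) 1)
    (fun f x => pvSetCell f ((H/2 : Nat) : Int) x '+')
    (by
      intro f x hx hf
      simp only []
      beta_reduce
      obtain ⟨hx0, hxW⟩ := (PySem.List.mem_pyRange_one).1 hx
      obtain ⟨xt, rfl⟩ : ∃ t : Nat, x = (t : Int) := ⟨x.toNat, (Int.toNat_of_nonneg hx0).symm⟩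
      have hxt : xt < W := by exact_mod_cast hxW
      constructor
      · exact pvInv_setCell f H W hf (H/2) xt (by omega) '+'
      · intro j i
        rw [pvGet2_setCell f H W hf (H/2) xt (by omega) hxt '+']
        simp only [Nat.cast_inj]
        split_ifs <;> first | rfl | omega)
  -- loop 4: vertical center line
  have L4 := pvFold_paint '+' (pvInv · H W)
    (fun y j i => y = (j : Int) ∧ i = W/2)
    (PySem.List.pyRange 0 (H:Int) 1)
    (fun f y => pvSetCell f y ((W/2 : Nat) : Int) '+')
    (by
      intro f y hy hf
      simp only []
      beta_reduce
      obtain ⟨hy0, hyH⟩ := (PySem.List.mem_pyRange_one).1 hy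
      obtain ⟨yt, rfl⟩ : ∃ t : Nat, y = (t : Int) := ⟨y.toNat, (Int.toNat_of_nonneg hy0).symm⟩
      have hyt : yt < H := by exact_mod_cast hyH
      constructor
      · exact pvInv_setCell f H W hf yt (W/2) hyt '+'
      · intro j i
        rw [pvGet2_setCell f H W hf yt (W/2) hyt (by omega) '+']
        simp only [Nat.cast_inj]
        split_ifs <;> first | rfl | omega)
  obtain ⟨hI1, hg1⟩ := L1 _ hInv0
  obtain ⟨hI2, hg2⟩ := L2 _ hI1
  obtain ⟨hI3, hg3⟩ := L3 _ hI2
  obtain ⟨hI4, hg4⟩ := L4 _ hI3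
  refine ⟨hI4, ?_⟩
  intro j i hj hi
  rw [hg4 j i, hg3 j i, hg2 j i, hg1 j i, hget0 j i]
  have e4 : (∃ y ∈ PySem.List.pyRange 0 (H:Int) 1, y = (j : Int) ∧ i = W/2) ↔ i = W/2 := by
    constructor
    · rintro ⟨y, _, rfl, hc⟩; exact hc
    · intro hc; exact ⟨j, (PySem.List.mem_pyRange_one).2 ⟨by omega, by exact_mod_cast hj⟩, rfl, hc⟩
  have e3 : (∃ x ∈ PySem.List.pyRange 0 (W:Int) 1, j = H/2 ∧ x = (i : Int)) ↔ j = H/2 := by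
    constructor
    · rintro ⟨x, _, hc, rfl⟩; exact hc
    · intro hc; exact ⟨i, (PySem.List.mem_pyRange_one).2 ⟨by omega, by exact_mod_cast hi⟩, hc, rfl⟩
  have e2 : (∃ y ∈ PySem.List.pyRange 0 (H:Int) 1, y = (j : Int) ∧ (i = 0 ∨ i = W - 1)) ↔ (i = 0 ∨ i = W - 1) := by
    constructor
    · rintro ⟨y, _, rfl, hc⟩; exact hc
    · intro hc; exact ⟨j, (PySem.List.mem_pyRange_one).2 ⟨by omega, by exact_mod_cast hj⟩, rfl, hc⟩
  have e1 : (∃ x ∈ PySem.List.pyRange 0 (W:Int) 1, (j = 0 ∨ j = H - 1) ∧ x = (i : Int)) ↔ (j = 0 ∨ j = H - 1) := by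
    constructor
    · rintro ⟨x, _, hc, rfl⟩; exact hc
    · intro hc; exact ⟨i, (PySem.List.mem_pyRange_one).2 ⟨by omega, by exact_mod_cast hi⟩, hc, rfl⟩
  simp only [e1, e2, e3, e4]
  have hjiW : j < H ∧ i < W := ⟨hj, hi⟩
  split_ifs <;> simp_all

-- B's row, with sizes and centers in Nat form
def pvRowB (W H j : Nat) : List Char :=
  if j = H / 2 then List.replicate W '+'
  else
    let chars : List Char :=
      if j = 0 ∨ j = H - 1 then List.replicate W '#'
      else if 2 ≤ W then '#' :: (List.replicate (W - 2) '\u2588' ++ ['#'])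
      else List.replicate W '#'
    chars.take (W / 2) ++ '+' :: chars.drop (W / 2 + 1)

theorem pvRowB_len (W H j : Nat) (hW : 1 ≤ W) : (pvRowB W H j).length = W := by
  unfold pvRowB
  split_ifs with h1 h2 h3 <;>
    simp [List.length_take, List.length_drop] <;> omega

theorem pvRowB_get (W H j i : Nat) (hW : 1 ≤ W) (hi : i < W) :
    (pvRowB W H j)[i]? = some (
      if i = W / 2 then '+'
      else if j = H / 2 then '+'
      else if i = 0 ∨ i = W - 1 then '#'
      else if j = 0 ∨ j = H - 1 then '#'
      else '\u2588') := by
  unfold pvRowB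
  by_cases hj : j = H / 2
  · subst hj
    rw [if_pos rfl, List.getElem?_replicate]
    split_ifs <;> first | rfl | (exfalso; omega)
  · rw [if_neg hj]
    simp only []
    set chars : List Char :=
      if j = 0 ∨ j = H - 1 then List.replicate W '#'
      else if 2 ≤ W then '#' :: (List.replicate (W - 2) '\u2588' ++ ['#'])
      else List.replicate W '#' with hchars
    have hclen : chars.length = W := by
      rw [hchars]; split_ifs <;> simp
      omega
    have htlen : (chars.take (W / 2)).length = W / 2 := by
      rw [List.length_take, hclen]; omega
    have hcget : ∀ k, k < W → chars[k]? = some (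
        if k = 0 ∨ k = W - 1 then '#' else
        if j = 0 ∨ j = H - 1 then '#' else '\u2588') := by
      intro k hk
      rw [hchars]
      by_cases b1 : j = 0 ∨ j = H - 1
      · rw [if_pos b1, List.getElem?_replicate, if_pos hk]
        split_ifs <;> rfl
      · rw [if_neg b1]
        by_cases b2 : 2 ≤ W
        · rw [if_pos b2, List.getElem?_cons]
          rcases Nat.eq_zero_or_pos k with hk0 | hk0
          · subst hk0
            rw [if_pos rfl, if_pos (Or.inl rfl)]
          · rw [if_neg (by omega : ¬ k = 0)]
            rcases Nat.lt_or_ge (k - 1) (W - 2) with hlt | hge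
            · rw [List.getElem?_append_left (by simpa using hlt),
                List.getElem?_replicate, if_pos hlt]
              split_ifs <;> first | rfl | (exfalso; omega)
            · rw [List.getElem?_append_right (by simp; omega), List.length_replicate]
              have h0 : k - 1 - (W - 2) = 0 := by omega
              rw [h0, List.getElem?_cons_zero, if_pos (by omega : k = 0 ∨ k = W - 1)]
        · rw [if_neg b2, List.getElem?_replicate, if_pos hk]
          split_ifs <;> first | rfl | (exfalso; omega)
    by_cases hiw : i < W / 2
    · rw [List.getElem?_append_left (by rw [htlen]; omega),
        List.getElem?_take_of_lt hiw, hcget i hi]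
      have hine : ¬ i = W / 2 := by omega
      rw [if_neg hine, if_neg hj]
    · rw [List.getElem?_append_right (by rw [htlen]; omega), htlen]
      by_cases hie : i = W / 2
      · have h0 : i - W / 2 = 0 := by omega
        rw [h0, List.getElem?_cons_zero, if_pos hie]
      · have h1 : i - W / 2 = (i - W / 2 - 1) + 1 := by omega
        rw [h1, List.getElem?_cons_succ, List.getElem?_drop, hcget _ (by omega)]
        have harith : W / 2 + 1 + (i - W / 2 - 1) = i := by omega
        rw [harith, if_neg hie, if_neg hj]

-- positive-size case, fully in Nat
theorem pv_main_pos (W H : Nat) (hW : 1 ≤ W) (hH : 1 ≤ H) :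
    generate_calibration_frame (W : Int) (H : Int) = generate_calibration_frame_alt (W : Int) (H : Int) := by
  obtain ⟨hInv, hget⟩ := pvA_props W H hW hH
  rw [pvA_eq W H]
  unfold generate_calibration_frame_alt
  simp only [pv_floordiv_two, PySem.List.pyRange_zero_nat, List.map_map]
  have hM : pvA W H = (List.range H).map (fun (j : Nat) => pvRowB W H j) := by
    apply List.ext_getElem?
    intro j
    by_cases hj : j < H
    · rw [List.getElem?_eq_getElem (show j < (pvA W H).length by rw [hInv.1]; exact hj),
        List.getElem?_map, List.getElem?_range hj]
      simp only [Option.map_some]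
      congr 1
      apply List.ext_getElem?
      intro i
      by_cases hi : i < W
      · have hrowW : ((pvA W H)[j]'(by rw [hInv.1]; exact hj)).length = W :=
          hInv.2 _ (List.getElem_mem _)
        have hcell : pvGet2 (pvA W H) j i
            = some (((pvA W H)[j]'(by rw [hInv.1]; exact hj))[i]'(by rw [hrowW]; exact hi)) := by
          unfold pvGet2
          rw [List.getElem?_eq_getElem (show j < (pvA W H).length by rw [hInv.1]; exact hj)]
          simp only [Option.bind_some]
          rw [List.getElem?_eq_getElem (show i < _ by rw [hrowW]; exact hi)]
        rw [hget j i hj hi] at hcell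
        rw [List.getElem?_eq_getElem (show i < _ from by rw [hrowW]; exact hi),
          Option.some_inj.1 hcell.symm, pvRowB_get W H j i hW hi]
      · have hrowW : ((pvA W H)[j]'(by rw [hInv.1]; exact hj)).length = W :=
          hInv.2 _ (List.getElem_mem _)
        rw [List.getElem?_eq_none (by rw [hrowW]; omega),
          List.getElem?_eq_none (by rw [pvRowB_len W H j hW]; omega)]
    · rw [List.getElem?_eq_none (by rw [hInv.1]; omega),
        List.getElem?_eq_none (by simp; omega)]
  rw [hM]
  congr 1
  congr 1
  apply List.map_congr_left
  intro j _
  simp only [Function.comp_apply]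
  have hc1 : (((j : Nat) : Int) == ((H / 2 : Nat) : Int)) = decide (j = H / 2) := by
    by_cases h : j = H / 2
    · simp [h]
    · simp only [h, decide_false]
      simp
      omega
  have hc2 : (((j : Nat) : Int) == 0 || ((j : Nat) : Int) == (H : Int) - 1)
      = decide (j = 0 ∨ j = H - 1) := by
    rcases Nat.eq_zero_or_pos H with h0 | h0
    · by_cases hj0 : j = 0 <;> by_cases hj1 : j = H - 1 <;>
        simp [hj0, hj1] <;> omega
    · by_cases hj0 : j = 0 <;> by_cases hj1 : j = H - 1 <;>
        simp [hj0, hj1] <;> omega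
  have ht2 : ((W : Int) - 2).toNat = W - 2 := by omega
  have hcx1 : (((W / 2 : Nat) : Int) + 1) = (((W / 2 + 1 : Nat)) : Int) := by push_cast; ring
  rw [hc1, hc2, hcx1]
  unfold pvRowB
  simp only [decide_eq_true_eq, Int.toNat_natCast, ht2, PySem.List.pyRepeat_singleton,
    PySem.List.slice_to_natCast, PySem.List.slice_from_natCast]
  have hc3 : ((2 : Int) ≤ (W : Int)) ↔ 2 ≤ W := by exact_mod_cast Iff.rfl
  simp only [hc3]
  split_ifs <;> simp [List.append_assoc]

-- the two string builders agree once the matrices agree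
theorem pv_main (width height : Int) (hpre : Pre_generate_calibration_frame width height) :
    generate_calibration_frame width height = generate_calibration_frame_alt width height := by
  rcases hpre with ⟨hw, hh⟩ | ⟨hw, hh⟩
  · -- 1 ≤ width, 1 ≤ height
    obtain ⟨W, rfl⟩ : ∃ W : Nat, width = (W : Int) := ⟨width.toNat, (Int.toNat_of_nonneg (by omega)).symm⟩
    obtain ⟨H, rfl⟩ : ∃ H : Nat, height = (H : Int) := ⟨height.toNat, (Int.toNat_of_nonneg (by omega)).symm⟩
    have hW : 1 ≤ W := by exact_mod_cast hw
    have hH : 1 ≤ H := by exact_mod_cast hh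
    exact pv_main_pos W H hW hH
  · -- width ≤ 0 ∧ height ≤ 0 : both sides are the empty string
    unfold generate_calibration_frame generate_calibration_frame_alt
    simp [PySem.List.pyRange_one_eq_nil (show (width : Int) ≤ 0 by omega),
      PySem.List.pyRange_one_eq_nil (show (height : Int) ≤ 0 by omega),
      Int.toNat_of_nonpos hh]

-- ===== VERDICT (by name: the statement is the Claim_ definition above) =====
theorem generate_calibration_frame_spec : Claim_equal_generate_calibration_frame := by
  intro width height _ hpre
  unfold Spec_generate_calibration_frame
  exact pv_main width height hpre
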